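-- pv_equiv track=rewrite | github.com/GabrielHKGodinho/Connect4Me | project/class/connect_four.py | has_winning_line
-- ===== SOURCE A (Python) =====
-- def has_winning_line(line, winning_length):
--     count = 0
--     last_side = 0
--     for x in line:
--         if x == last_side:
--             count += 1
--             if count == winning_length:
--                 return last_side
--         else:
--             count = 1
--             last_side = x
--     return 0
-- ===== SOURCE B (Python) =====
-- def has_winning_line(line, winning_length):
--     k = winning_length
--     if k < 1:
--         return 0
--     for i in range(len(line) - k + 1):
--         if line[i:i+k] == [line[i]] * k:
--             return line[i]
--     return 0
-- ===== Notes on version B (the rewrite author's own statement) =====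
-- stated objective: alternative
-- what changed: B scans window start indices i and returns line[i] for the first all-equal window of size winning_length (slice comparison line[i:i+k] == [line[i]]*k), instead of A's one-pass count/last_side run-counter state machine with an in-loop early return.
-- intended difference: When winning_length == 1 and the line starts with a nonzero side, A returns 0 because its win check only fires on the increment branch (the initial last_side=0 state makes a single piece never count as a win), while B returns that side, which is the intended answer since any single piece is a run of length 1. — e.g. on has_winning_line([1], 1): A returns 0, B returns 1
import Mathlib
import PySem

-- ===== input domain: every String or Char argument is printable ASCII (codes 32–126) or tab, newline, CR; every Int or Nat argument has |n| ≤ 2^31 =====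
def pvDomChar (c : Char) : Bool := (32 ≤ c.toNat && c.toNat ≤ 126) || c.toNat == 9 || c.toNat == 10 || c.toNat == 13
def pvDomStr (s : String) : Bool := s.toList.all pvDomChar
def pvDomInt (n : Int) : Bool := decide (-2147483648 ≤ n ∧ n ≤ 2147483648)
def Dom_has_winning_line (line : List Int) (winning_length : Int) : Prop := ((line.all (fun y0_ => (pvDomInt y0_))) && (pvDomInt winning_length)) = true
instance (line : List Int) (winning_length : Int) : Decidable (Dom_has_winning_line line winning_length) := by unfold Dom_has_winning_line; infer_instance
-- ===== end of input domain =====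

-- B replaces A's count/last_side run-counter state machine by a scan over window start indices
-- comparing each slice line[i:i+k] with [line[i]]*k (alternative decomposition);
-- B differs intentionally at winning_length = 1 (see D_).


-- ===== PORT A =====
-- A's loop with early return, as structural recursion over the list with state (count, last_side).
def hwlGoA (xs : List Int) (count last_side winning_length : Int) : Int :=
  match xs with
  | [] => 0
  | x :: rest =>
    if x = last_side then
      if count + 1 = winning_length then last_side
      else hwlGoA rest (count + 1) last_side winning_length
    else hwlGoA rest 1 x winning_length

def has_winning_line (line : List Int) (winning_length : Int) : Int :=
  hwlGoA line 0 0 winning_length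

-- ===== PORT B =====
-- B's for-loop over i in range(len(line)-k+1), as structural recursion over that index list;
-- body: if line[i:i+k] == [line[i]]*k: return line[i].  (line[i] always exists for these i since
-- k >= 1, so the 'none' arm of pyGet? is unreachable.)
def hwlWin (line : List Int) (k : Int) (idxs : List Int) : Int :=
  match idxs with
  | [] => 0
  | i :: rest =>
    match PySem.List.pyGet? line i with
    | none => 0
    | some v =>
      if PySem.List.slice line (some i) (some (i + k)) = List.replicate k.toNat v then v
      else hwlWin line k rest

def has_winning_line_alt (line : List Int) (winning_length : Int) : Int :=
  if winning_length < 1 then 0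
  else hwlWin line winning_length
    (PySem.List.pyRange 0 ((line.length : Int) - winning_length + 1) 1)

-- ===== PRECONDITION & SPEC =====
-- When winning_length = 1 and the line starts with a nonzero side, A returns 0 (its win check only
-- fires on the increment branch, so a single piece never wins), while B returns that side, the
-- intended answer since any single piece is a run of length 1.
def D_has_winning_line (line : List Int) (winning_length : Int) : Prop :=
  winning_length = 1 ∧ line ≠ [] ∧ line.headI ≠ 0
instance (line : List Int) (winning_length : Int) : Decidable (D_has_winning_line line winning_length) := by unfold D_has_winning_line; infer_instance

def Spec_has_winning_line (line : List Int) (winning_length : Int) (out : Int) : Prop := ¬ D_has_winning_line line winning_length → out = has_winning_line_alt line winning_length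
instance (line : List Int) (winning_length : Int) (out : Int) : Decidable (Spec_has_winning_line line winning_length out) := by unfold Spec_has_winning_line; infer_instance

def pvDiffWitness_has_winning_line : List Int × Int := ([1], 1)
def pvDiffWitnessOut_has_winning_line : Int × Int := (0, 1)

-- ===== CLAIM (what is proved, stated in full; the proofs are below) =====
def Claim_unchanged_has_winning_line : Prop := ∀ (line : List Int) (winning_length : Int), Dom_has_winning_line line winning_length → Spec_has_winning_line line winning_length (has_winning_line line winning_length)
def Claim_changed_has_winning_line : Prop := Dom_has_winning_line (pvDiffWitness_has_winning_line.1) (pvDiffWitness_has_winning_line.2) ∧ D_has_winning_line (pvDiffWitness_has_winning_line.1) (pvDiffWitness_has_winning_line.2) ∧ has_winning_line (pvDiffWitness_has_winning_line.1) (pvDiffWitness_has_winning_line.2) = pvDiffWitnessOut_has_winning_line.1 ∧ has_winning_line_alt (pvDiffWitness_has_winning_line.1) (pvDiffWitness_has_winning_line.2) = pvDiffWitnessOut_has_winning_line.2 ∧ pvDiffWitnessOut_has_winning_line.1 ≠ pvDiffWitnessOut_has_winning_line.2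
def Claim_exact_has_winning_line : Prop := ∀ (line : List Int) (winning_length : Int), Dom_has_winning_line line winning_length → D_has_winning_line line winning_length → has_winning_line line winning_length ≠ has_winning_line_alt line winning_length



-- ===== LEMMAS AND PROOFS =====

-- Proof-only helper: B's window search expressed as recursion on the suffix of the line.
def hwlSuf (line : List Int) (k : Int) : Int :=
  match line with
  | [] => 0
  | x :: rest =>
    if ((x :: rest).length : Int) < k then 0
    else if (x :: rest).take k.toNat = List.replicate k.toNat x then x
    else hwlSuf rest k

-- Unfolding lemma for the suffix recursion.
theorem hwlSuf_cons (x : Int) (rest : List Int) (k : Int) (_hk : 0 ≤ k) :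
    hwlSuf (x :: rest) k =
      if ((x :: rest).length : Int) < k then 0
      else if (x :: rest).take k.toNat = List.replicate k.toNat x then x
      else hwlSuf rest k := by
  rw [hwlSuf]

-- B returns 0 on a list shorter than k.
theorem hwlSuf_short (xs : List Int) (k : Int) (h : (xs.length : Int) < k) :
    hwlSuf xs k = 0 := by
  cases xs with
  | nil => rfl
  | cons x rest => rw [hwlSuf_cons x rest k (by simp at h ⊢; omega), if_pos h]

-- B wins immediately on replicate k.toNat l ++ rest when 1 ≤ k.
theorem hwlSuf_win (l k : Int) (rest : List Int) (hk : 1 ≤ k) :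
    hwlSuf (List.replicate k.toNat l ++ rest) k = l := by
  obtain ⟨n, hn⟩ : ∃ n, k.toNat = n + 1 := ⟨k.toNat - 1, by omega⟩
  have hlist : List.replicate k.toNat l ++ rest = l :: (List.replicate n l ++ rest) := by
    rw [hn, List.replicate_succ]; simp
  rw [hlist, hwlSuf_cons _ _ _ (by omega)]
  have hlen : ¬ (((l :: (List.replicate n l ++ rest)).length : Int) < k) := by
    simp [List.length_replicate]; omega
  rw [if_neg hlen]
  have htake : (l :: (List.replicate n l ++ rest)).take k.toNat = List.replicate k.toNat l := by
    rw [← hlist, List.take_append_of_le_length (by simp), List.take_replicate]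
    simp
  rw [if_pos htake]

-- B's index loop from index i equals the suffix recursion on xs.drop i (k ≥ 1; d bounds the
-- remaining indices for the induction).
theorem hwlWin_eq_suf (xs : List Int) (k : Int) (hk : 1 ≤ k) :
    ∀ (d i : Nat), xs.length ≤ i + d →
      hwlWin xs k (PySem.List.pyRange (i : Int) ((xs.length : Int) - k + 1) 1)
        = hwlSuf (xs.drop i) k := by
  intro d
  induction d with
  | zero =>
    intro i h
    simp only [Nat.add_zero] at h
    rw [PySem.List.pyRange_one_eq_nil (by omega), List.drop_of_length_le h]
    rfl
  | succ m ih =>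
    intro i h
    by_cases hib : ((xs.length : Int) - k + 1) ≤ (i : Int)
    · rw [PySem.List.pyRange_one_eq_nil hib]
      have hlen : ((xs.drop i).length : Int) < k := by
        rw [List.length_drop]; omega
      exact (hwlSuf_short _ _ hlen).symm
    · have hib' : (i : Int) < (xs.length : Int) - k + 1 := by omega
      have hi : i < xs.length := by
        have := hib'; omega
      have hdrop : xs.drop i = xs[i]'hi :: xs.drop (i + 1) := List.drop_eq_getElem_cons hi
      have hget : PySem.List.pyGet? xs (i : Int) = some (xs[i]'hi) := by
        rw [PySem.List.pyGet?_natCast]; exact List.getElem?_eq_getElem hi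
      have hslice : PySem.List.slice xs (some (i : Int)) (some ((i : Int) + k))
          = (xs.drop i).take k.toNat := by
        have ha : (0 : Int) ≤ (i : Int) := Int.natCast_nonneg i
        have hb : (0 : Int) ≤ (i : Int) + k := by omega
        rw [PySem.List.slice_toNat xs ha hb]
        have h1 : ((i : Int)).toNat = i := Int.toNat_natCast i
        simp only [h1]
        have h2 : ((i : Int) + k).toNat - i = k.toNat := by omega
        rw [h2]
      rw [PySem.List.pyRange_one_cons hib']
      simp only [hwlWin, hget]
      rw [hslice, hdrop, hwlSuf_cons _ _ _ (by omega)]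
      have hlen2 : ¬ (((xs[i] :: xs.drop (i + 1)).length : Int) < k) := by
        rw [← hdrop, List.length_drop]; omega
      rw [if_neg hlen2]
      by_cases heq : (xs[i] :: xs.drop (i + 1)).take k.toNat
          = List.replicate k.toNat xs[i]
      · rw [if_pos heq, if_pos heq]
      · rw [if_neg heq, if_neg heq]
        have hcast : ((i : Int) + 1) = (((i + 1 : Nat)) : Int) := by push_cast; ring
        rw [hcast]
        exact ih (i + 1) (by omega)

-- has_winning_line_alt in terms of the suffix recursion, for k ≥ 1.
theorem alt_eq_suf (xs : List Int) (k : Int) (hk : 1 ≤ k) :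
    has_winning_line_alt xs k = hwlSuf xs k := by
  unfold has_winning_line_alt
  rw [if_neg (by omega)]
  have h := hwlWin_eq_suf xs k hk xs.length 0 (by omega)
  simpa using h

-- Peeling the leading run: with a block of c copies of l (1 ≤ c < k) in front of x::rest, x ≠ l,
-- B never finds an all-equal window starting inside the block.
theorem hwlSuf_peel (l x k : Int) (rest : List Int) (hx : x ≠ l) :
    ∀ (c : ℕ), 1 ≤ c → (c : Int) < k →
      hwlSuf (List.replicate c l ++ x :: rest) k = hwlSuf (x :: rest) k := by
  intro c
  induction c with
  | zero => intro h; omega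
  | succ m ih =>
    intro _ hck
    have hk0 : (0:Int) ≤ k := by omega
    rw [List.replicate_succ, List.cons_append, hwlSuf_cons _ _ _ hk0]
    by_cases hlen : ((l :: (List.replicate m l ++ x :: rest)).length : Int) < k
    · rw [if_pos hlen]
      refine (hwlSuf_short _ _ ?_).symm
      simp at hlen ⊢; omega
    · rw [if_neg hlen]
      have hne : (l :: (List.replicate m l ++ x :: rest)).take k.toNat ≠ List.replicate k.toNat l := by
        intro heq
        have hmem : x ∈ (l :: (List.replicate m l ++ x :: rest)).take k.toNat := by
          have hform : l :: (List.replicate m l ++ x :: rest)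
              = List.replicate (m + 1) l ++ x :: rest := by
            rw [List.replicate_succ]; simp
          rw [hform, List.take_append]
          refine List.mem_append_right _ ?_
          obtain ⟨t, ht⟩ : ∃ t, k.toNat - (List.replicate (m + 1) l).length = t + 1 :=
            ⟨k.toNat - (m + 1) - 1, by simp; omega⟩
          rw [ht, List.take_succ_cons]
          exact List.mem_cons_self
        rw [heq] at hmem
        exact hx (List.eq_of_mem_replicate hmem)
      rw [if_neg hne]
      rcases Nat.eq_zero_or_pos m with hm | hm
      · subst hm; simp
      · exact ih hm (by push_cast at hck ⊢; omega)

-- For non-positive winning_length A never fires its check.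
theorem hwlGoA_nonpos (wl : Int) (hwl : wl ≤ 0) :
    ∀ (xs : List Int) (c l : Int), 0 ≤ c → hwlGoA xs c l wl = 0 := by
  intro xs
  induction xs with
  | nil => intro c l _; rfl
  | cons x rest ih =>
    intro c l hc
    simp only [hwlGoA]
    split_ifs with h1 h2
    · omega
    · exact ih (c + 1) l (by omega)
    · exact ih 1 x (by omega)

-- For winning_length = 1 A never fires its check once count ≥ 1.
theorem hwlGoA_one : ∀ (xs : List Int) (c l : Int), 1 ≤ c → hwlGoA xs c l 1 = 0 := by
  intro xs
  induction xs with
  | nil => intro c l _; rfl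
  | cons x rest ih =>
    intro c l hc
    simp only [hwlGoA]
    split_ifs with h1 h2
    · omega
    · exact ih (c + 1) l (by omega)
    · exact ih 1 x (by omega)

-- Main invariant (k ≥ 2): A's loop with pending run (l, c), 1 ≤ c < k, equals B's window search
-- on the pending block followed by the rest of the line.
theorem hwlGoA_eq_goB (k : Int) (hk : 2 ≤ k) :
    ∀ (xs : List Int) (c l : Int), 1 ≤ c → c < k →
      hwlGoA xs c l k = hwlSuf (List.replicate c.toNat l ++ xs) k := by
  intro xs
  induction xs with
  | nil =>
    intro c l hc hck
    refine (hwlSuf_short _ _ ?_).symm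
    simp; omega
  | cons x rest ih =>
    intro c l hc hck
    by_cases hx : x = l
    · subst hx
      have hblock : List.replicate c.toNat x ++ x :: rest
          = List.replicate (c + 1).toNat x ++ rest := by
        have h1 : (c + 1).toNat = c.toNat + 1 := by omega
        rw [h1, List.replicate_succ']; simp
      simp only [hwlGoA]
      by_cases hcw : c + 1 = k
      · rw [if_pos hcw, hblock, hcw]
        exact (hwlSuf_win x k rest (by omega)).symm
      · rw [if_neg hcw, hblock]
        exact ih (c + 1) x (by omega) (by omega)
    · simp only [hwlGoA, if_neg hx]
      rw [hwlSuf_peel l x k rest hx c.toNat (by omega) (by omega)]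
      have h1 : List.replicate (1 : Int).toNat x ++ rest = x :: rest := by simp
      rw [← h1]
      exact ih 1 x le_rfl (by omega)

-- ===== VERDICT (by name: the statement is the Claim_ definition above) =====
theorem has_winning_line_spec : Claim_unchanged_has_winning_line := by
  intro line wl _ hnd
  rcases lt_trichotomy wl 1 with hlt | heq | hgt
  · unfold has_winning_line has_winning_line_alt
    rw [if_pos hlt]
    exact hwlGoA_nonpos wl (by omega) line 0 0 le_rfl
  · subst heq
    rw [alt_eq_suf line 1 le_rfl]
    unfold has_winning_line
    rcases line with _ | ⟨x, rest⟩
    · rfl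
    · have hx0 : x = 0 := by
        by_contra hx
        exact hnd ⟨rfl, by simp, by simpa using hx⟩
      subst hx0
      have h1 : (0:Int) :: rest = List.replicate (1 : Int).toNat 0 ++ rest := by simp
      rw [h1, hwlSuf_win 0 1 rest le_rfl, ← h1]
      simp only [hwlGoA]
      norm_num
  · rw [alt_eq_suf line wl (by omega)]
    unfold has_winning_line
    rcases line with _ | ⟨x, rest⟩
    · rfl
    · have hstep : hwlGoA (x :: rest) 0 0 wl = hwlGoA rest 1 x wl := by
        by_cases hx : x = 0
        · subst hx
          simp only [hwlGoA]
          rw [if_pos trivial, if_neg (show ¬((0:Int) + 1 = wl) by omega)]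
          norm_num
        · simp only [hwlGoA, if_neg hx]
      rw [hstep]
      have h1 : List.replicate (1 : Int).toNat x ++ rest = x :: rest := by simp
      rw [hwlGoA_eq_goB wl (by omega) rest 1 x le_rfl (by omega), h1]

theorem has_winning_line_changed : Claim_changed_has_winning_line := by
  unfold Claim_changed_has_winning_line; decide

theorem has_winning_line_tight : Claim_exact_has_winning_line := by
  intro line wl _ hd
  obtain ⟨hwl, hne, hh⟩ := hd
  subst hwl
  rcases line with _ | ⟨x, rest⟩
  · exact absurd rfl hne
  · simp only [List.headI] at hh
    have hA : has_winning_line (x :: rest) 1 = 0 := by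
      unfold has_winning_line
      simp only [hwlGoA]
      split_ifs with h1 h2
      · omega
      · exact hwlGoA_one rest 1 0 le_rfl
      · exact hwlGoA_one rest 1 x le_rfl
    have hB : has_winning_line_alt (x :: rest) 1 = x := by
      rw [alt_eq_suf (x :: rest) 1 le_rfl]
      have h1 : (x :: rest) = List.replicate (1 : Int).toNat x ++ rest := by simp
      rw [h1, hwlSuf_win x 1 rest le_rfl]
    rw [hA, hB]
    exact fun h => hh h.symm
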